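-- pv_equiv track=rewrite | github.com/Minep/my-pytoolkit | bincalc/utils.py | arrange
-- ===== SOURCE A (Python) =====
-- from itertools import zip_longest
-- import math
--
-- def arrange(values, cols=2, seq_number=True):
--     max_len = 0
--     strs = []
--
--     for v in values:
--         v = str(v)
--         max_len = max(len(v), max_len)
--         strs.append(v)
--
--     temp = []
--     for i, s in enumerate(strs):
--         s = s.ljust(max_len)
--         if seq_number:
--             temp.append(f"{i}.".rjust(3) + " " + s)
--         else:
--             temp.append(s)
--
--     spilts = []
--     seg = math.ceil(len(temp) / cols)
--     pos = 0
--
--     while pos < len(temp):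
--         to = min(len(temp), pos + seg)
--         spilts.append(temp[pos:to])
--
--         pos += seg
--
--     result = []
--     for parts in zip_longest(*spilts):
--         line = []
--         for part in parts:
--             if not part:
--                 line.append(" " * max_len)
--             else:
--                 line.append(part)
--         result.append(" ".join(line))
--
--     return "\n".join(result)
-- ===== SOURCE B (Python) =====
-- import math
--
-- def arrange(values, cols=2, seq_number=True):
--     max_len = 0
--     strs = []
--     for v in values:
--         v = str(v)
--         max_len = max(len(v), max_len)
--         strs.append(v)
--
--     temp = []
--     for i, s in enumerate(strs):
--         s = s.ljust(max_len)
--         temp.append(f"{i}.".rjust(3) + " " + s if seq_number else s)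
--
--     n = len(temp)
--     seg = math.ceil(n / cols)
--     if seg <= 0:
--         return ""
--     ncols = math.ceil(n / seg)
--     pad = " " * max_len
--     lines = [" ".join([temp[c * seg + i] if c * seg + i < n else pad
--                        for c in range(ncols)])
--              for i in range(seg)]
--     return "\n".join(lines)
-- ===== Notes on version B (the rewrite author's own statement) =====
-- stated objective: alternative
-- what changed: B keeps the two formatting passes but replaces A's chunk-slicing while loop plus itertools.zip_longest transpose (with its falsy-cell fill) by direct row-major index arithmetic: row i of the output is built from temp[c*seg+i] for each column c, padding when the index runs past the end.
import Mathlib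
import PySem

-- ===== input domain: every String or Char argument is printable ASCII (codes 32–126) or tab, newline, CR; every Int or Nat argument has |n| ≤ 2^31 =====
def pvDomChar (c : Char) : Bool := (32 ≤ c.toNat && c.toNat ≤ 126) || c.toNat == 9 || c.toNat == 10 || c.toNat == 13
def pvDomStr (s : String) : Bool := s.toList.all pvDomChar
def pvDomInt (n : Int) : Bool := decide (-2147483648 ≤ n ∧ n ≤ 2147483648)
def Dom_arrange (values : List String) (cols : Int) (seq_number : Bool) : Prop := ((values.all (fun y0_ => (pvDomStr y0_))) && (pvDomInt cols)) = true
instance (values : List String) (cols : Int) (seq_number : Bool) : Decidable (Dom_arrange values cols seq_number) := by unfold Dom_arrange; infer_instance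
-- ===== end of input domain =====

-- B replaces A's chunk list + zip_longest transpose by direct row-major index arithmetic (pos = c*seg + i); objective: alternative decomposition, same cost.

-- ===== PORT A =====
-- shared small string helpers (exact ports of the Python builtins on ASCII strings)
def pySpaces (n : Nat) : List Char := List.replicate n ' '   -- " " * n
def pyLjust (s : List Char) (w : Nat) : List Char := s ++ List.replicate (w - s.length) ' '   -- s.ljust(w), exact
def pyRjust3 (s : List Char) : List Char := List.replicate (3 - s.length) ' ' ++ s   -- s.rjust(3), exact
-- math.ceil(a / b) for ints: exact whenever the float quotient rounds to the right side, in particular on all |a|,|b| ≤ 2^31 with |a| ≤ list lengths used here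
def pyCeilDiv (a b : Int) : Int := -(PySem.Int.floordiv (-a) b)

-- itertools.zip_longest(*chunks) with fillvalue None, ported by its contract (stdlib call)
def zipLongest (chunks : List (List (List Char))) : List (List (Option (List Char))) :=
  let m := chunks.foldl (fun a ch => max a ch.length) 0
  (List.range m).map (fun i => chunks.map (fun ch => ch[i]?))

-- A's while loop; fuel temp.length+1 suffices whenever the Python loop terminates (seg ≥ 1, or temp = [])
def splitsGo (temp : List (List Char)) (seg : Int) : Nat → Int → List (List (List Char))
  | 0, _ => []
  | fuel+1, pos =>
    if pos < (temp.length : Int) then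
      PySem.List.slice temp (some pos) (some (min (temp.length : Int) (pos + seg))) ::
        splitsGo temp seg fuel (pos + seg)
    else []

def arrange (values : List String) (cols : Int) (seq_number : Bool) : String :=
  let ms := values.foldl (fun (acc : Nat × List (List Char)) v =>
      let v := v.toList
      (max v.length acc.1, acc.2 ++ [v])) (0, [])
  let max_len := ms.1
  let strs := ms.2
  let temp := (PySem.List.enumerate strs).foldl (fun (acc : List (List Char)) p =>
      let s := pyLjust p.2 max_len
      if seq_number then acc ++ [pyRjust3 ((PySem.Int.toStr p.1).toList ++ ['.']) ++ [' '] ++ s]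
      else acc ++ [s]) []
  let seg := pyCeilDiv (temp.length : Int) cols
  let spilts := splitsGo temp seg (temp.length + 1) 0
  let result := (zipLongest spilts).foldl (fun (acc : List (List Char)) parts =>
      let line := parts.foldl (fun (ln : List (List Char)) part =>
        match part with
        | none => ln ++ [pySpaces max_len]          -- `if not part` (None)
        | some p => if p = [] then ln ++ [pySpaces max_len] else ln ++ [p]) []   -- `if not part` (empty string)
      acc ++ [PySem.Chars.join [' '] line]) []
  String.ofList (PySem.Chars.join ['\n'] result)

-- ===== PORT B =====
def arrange_alt (values : List String) (cols : Int) (seq_number : Bool) : String :=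
  let ms := values.foldl (fun (acc : Nat × List (List Char)) v =>
      let v := v.toList
      (max v.length acc.1, acc.2 ++ [v])) (0, [])
  let max_len := ms.1
  let strs := ms.2
  let temp := (PySem.List.enumerate strs).foldl (fun (acc : List (List Char)) p =>
      acc ++ [if seq_number then pyRjust3 ((PySem.Int.toStr p.1).toList ++ ['.']) ++ [' '] ++ pyLjust p.2 max_len
              else pyLjust p.2 max_len]) []
  let n := temp.length
  let seg := pyCeilDiv (n : Int) cols
  if seg ≤ 0 then "" else
  let ncols := pyCeilDiv (n : Int) seg
  let pad := pySpaces max_len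
  let lines := (PySem.List.pyRange 0 seg 1).map (fun i =>
      PySem.Chars.join [' '] ((PySem.List.pyRange 0 ncols 1).map (fun c =>
        if c * seg + i < (n : Int) then PySem.List.pyGetD temp (c * seg + i) pad else pad)))   -- temp[pos], guarded in range
  String.ofList (PySem.Chars.join ['\n'] lines)

-- ===== PRECONDITION & SPEC =====
-- Pre_ excludes exactly the inputs where the Python A does not return: cols = 0 (ZeroDivisionError in math.ceil(len/cols))
-- and cols < 0 with a nonempty list (A's while loop never advances: it runs forever).
def Pre_arrange (values : List String) (cols : Int) (seq_number : Bool) : Prop :=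
  0 < cols ∨ (values = [] ∧ cols ≠ 0)
instance (values : List String) (cols : Int) (seq_number : Bool) : Decidable (Pre_arrange values cols seq_number) := by unfold Pre_arrange; infer_instance

def pvWitness_arrange : List String × Int × Bool := (["ab", "c", "def"], 2, true)

def Spec_arrange (values : List String) (cols : Int) (seq_number : Bool) (out : String) : Prop := out = arrange_alt values cols seq_number
instance (values : List String) (cols : Int) (seq_number : Bool) (out : String) : Decidable (Spec_arrange values cols seq_number out) := by unfold Spec_arrange; infer_instance

-- ===== CLAIM (what is proved, stated in full; the proofs are below) =====
def Claim_equal_arrange : Prop := ∀ (values : List String) (cols : Int) (seq_number : Bool), Dom_arrange values cols seq_number → Pre_arrange values cols seq_number → Spec_arrange values cols seq_number (arrange values cols seq_number)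

-- ===== LEMMAS AND PROOFS =====

-- the value appended for entry (i, s) of strs
def entryF (b : Bool) (ml : Nat) (p : Int × List Char) : List Char :=
  if b then pyRjust3 ((PySem.Int.toStr p.1).toList ++ ['.']) ++ [' '] ++ pyLjust p.2 ml
  else pyLjust p.2 ml

-- the cell A emits for one zip_longest slot
def cellF (ml : Nat) (o : Option (List Char)) : List Char :=
  match o with
  | none => pySpaces ml
  | some p => if p = [] then pySpaces ml else p

theorem foldl_app {α β : Type} (f : α → β) (l : List α) :
    ∀ (acc : List β), l.foldl (fun a x => a ++ [f x]) acc = acc ++ l.map f := by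
  induction l with
  | nil => simp
  | cons x xs ih => intro acc; simp [ih]

theorem fold1 (values : List String) :
    ∀ (m : Nat) (a : List (List Char)),
      values.foldl (fun (acc : Nat × List (List Char)) v =>
          (max v.toList.length acc.1, acc.2 ++ [v.toList])) (m, a)
      = (values.foldl (fun m v => max v.toList.length m) m, a ++ values.map String.toList) := by
  induction values with
  | nil => simp
  | cons v vs ih =>
    intro m a
    rw [List.foldl_cons, List.foldl_cons, ih]
    simp only [List.map_cons, List.append_assoc, List.singleton_append]

theorem entry_len (b : Bool) (ml : Nat) (p : Int × List Char) : ml ≤ (entryF b ml p).length := by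
  cases b <;> simp [entryF, pyRjust3, pyLjust] <;> omega

theorem tempA_eq (b : Bool) (ml : Nat) (strs : List (List Char)) :
    (PySem.List.enumerate strs).foldl (fun (acc : List (List Char)) p =>
        let s := pyLjust p.2 ml
        if b then acc ++ [pyRjust3 ((PySem.Int.toStr p.1).toList ++ ['.']) ++ [' '] ++ s]
        else acc ++ [s]) []
    = (PySem.List.enumerate strs).map (entryF b ml) := by
  have h : (fun (acc : List (List Char)) (p : Int × List Char) =>
        let s := pyLjust p.2 ml
        if b then acc ++ [pyRjust3 ((PySem.Int.toStr p.1).toList ++ ['.']) ++ [' '] ++ s]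
        else acc ++ [s])
      = fun acc p => acc ++ [entryF b ml p] := by
    funext acc p; cases b <;> simp [entryF]
  rw [h, foldl_app]
  simp

theorem tempB_eq (b : Bool) (ml : Nat) (strs : List (List Char)) :
    (PySem.List.enumerate strs).foldl (fun (acc : List (List Char)) p =>
        acc ++ [if b then pyRjust3 ((PySem.Int.toStr p.1).toList ++ ['.']) ++ [' '] ++ pyLjust p.2 ml
                else pyLjust p.2 ml]) []
    = (PySem.List.enumerate strs).map (entryF b ml) := by
  have h : (fun (acc : List (List Char)) (p : Int × List Char) =>
        acc ++ [if b then pyRjust3 ((PySem.Int.toStr p.1).toList ++ ['.']) ++ [' '] ++ pyLjust p.2 ml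
                else pyLjust p.2 ml])
      = fun acc p => acc ++ [entryF b ml p] := by
    funext acc p; cases b <;> simp [entryF]
  rw [h, foldl_app]
  simp

theorem pyRange_nat (m : Nat) : PySem.List.pyRange 0 (m : Int) 1 = (List.range m).map (fun (k : Nat) => (k : Int)) := by
  cases m with
  | zero => simp [PySem.List.pyRange]
  | succ k =>
    simp only [PySem.List.pyRange, if_neg (by norm_num : (1:Int) ≠ 0), if_pos (by norm_num : (0:Int) < 1)]
    rw [if_pos (by exact_mod_cast Nat.succ_pos k)]
    norm_num

theorem pyRange_int (m : Int) (h : 0 ≤ m) :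
    PySem.List.pyRange 0 m 1 = (List.range m.toNat).map (fun (k : Nat) => (k : Int)) := by
  have : m = (m.toNat : Int) := by omega
  rw [this]
  exact pyRange_nat _

theorem splitsGo_len (temp : List (List Char)) (g : Int) (hg : 0 < g) :
    ∀ (fuel p : Nat), temp.length ≤ p + fuel * g.toNat →
      (splitsGo temp g fuel (p : Int)).length = (temp.length - p + g.toNat - 1) / g.toNat := by
  have hs : 0 < g.toNat := by omega
  intro fuel
  induction fuel with
  | zero =>
    intro p h
    simp only [splitsGo, List.length_nil]
    rw [Nat.div_eq_of_lt (by omega)]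
  | succ f ih =>
    intro p h
    simp only [splitsGo]
    by_cases hp : p < temp.length
    · rw [if_pos (by exact_mod_cast hp)]
      have hcast : (p : Int) + g = ((p + g.toNat : Nat) : Int) := by push_cast; omega
      rw [hcast]
      have hbound : temp.length ≤ (p + g.toNat) + f * g.toNat := by
        have : (f + 1) * g.toNat = f * g.toNat + g.toNat := by
          rw [Nat.add_mul, Nat.one_mul]
        omega
      rw [List.length_cons, ih (p + g.toNat) hbound]
      by_cases hps : temp.length ≤ p + g.toNat
      · have e0 : temp.length - (p + g.toNat) = 0 := by omega
        rw [e0, Nat.div_eq_of_lt (by omega),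
          show (temp.length - p + g.toNat - 1) / g.toNat = 1 from
            Nat.div_eq_of_lt_le (by omega) (by omega)]
      · have e1 : temp.length - p + g.toNat - 1 = (temp.length - (p + g.toNat) + g.toNat - 1) + g.toNat := by omega
        rw [e1, Nat.add_div_right _ hs]
    · rw [if_neg (by exact_mod_cast hp)]
      simp only [List.length_nil]
      rw [Nat.div_eq_of_lt (by omega)]

theorem splitsGo_get (temp : List (List Char)) (g : Int) (hg : 0 < g) :
    ∀ (fuel p : Nat), temp.length ≤ p + fuel * g.toNat → ∀ (c : Nat),
      (splitsGo temp g fuel (p : Int))[c]? =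
        if p + c * g.toNat < temp.length then some ((temp.drop (p + c * g.toNat)).take g.toNat) else none := by
  have hs : 0 < g.toNat := by omega
  intro fuel
  induction fuel with
  | zero =>
    intro p h c
    simp only [splitsGo, List.getElem?_nil]
    rw [if_neg (by omega)]
  | succ f ih =>
    intro p h c
    simp only [splitsGo]
    by_cases hp : p < temp.length
    · rw [if_pos (by exact_mod_cast hp)]
      cases c with
      | zero =>
        simp only [List.getElem?_cons_zero, Nat.zero_mul, Nat.add_zero]
        rw [if_pos hp]
        congr 1
        rw [PySem.List.slice_toNat temp (by positivity) (by
          have : (0:Int) ≤ (p:Int) + g := by omega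
          omega)]
        have h1 : ((min ((temp.length : Nat) : Int) ((p:Int) + g)).toNat) = min temp.length (p + g.toNat) := by omega
        have h2 : ((p:Int)).toNat = p := by omega
        rw [h1, h2]
        rw [List.take_eq_take_iff]
        simp only [List.length_drop]
        omega
      | succ c =>
        simp only [List.getElem?_cons_succ]
        have hcast : (p : Int) + g = ((p + g.toNat : Nat) : Int) := by push_cast; omega
        have hbound : temp.length ≤ (p + g.toNat) + f * g.toNat := by
          have : (f + 1) * g.toNat = f * g.toNat + g.toNat := by
            rw [Nat.add_mul, Nat.one_mul]
          omega
        rw [hcast, ih (p + g.toNat) hbound c]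
        have e : (p + g.toNat) + c * g.toNat = p + (c+1) * g.toNat := by ring
        rw [e]
    · rw [if_neg (by exact_mod_cast hp)]
      simp only [List.getElem?_nil]
      rw [if_neg (by omega)]

theorem foldl_max_le (l : List Nat) : ∀ (a b : Nat), a ≤ b → (∀ x ∈ l, x ≤ b) → l.foldl max a ≤ b := by
  induction l with
  | nil => intro a b h _; simpa using h
  | cons x xs ih =>
    intro a b ha h
    exact ih _ _ (max_le ha (h x (by simp))) (fun y hy => h y (by simp [hy]))

theorem le_foldl_max' (l : List Nat) : ∀ (a : Nat), a ≤ l.foldl max a := by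
  induction l with
  | nil => simp
  | cons x xs ih => intro a; exact le_trans (le_max_left a x) (ih _)

theorem mem_le_foldl_max (l : List Nat) : ∀ (a : Nat), ∀ x ∈ l, x ≤ l.foldl max a := by
  induction l with
  | nil => simp
  | cons y ys ih =>
    intro a x hx
    rcases List.mem_cons.mp hx with h | h
    · subst h; exact le_trans (le_max_right a x) (le_foldl_max' ys _)
    · exact ih _ x h

theorem cellF_of_mem (ml : Nat) (t : List Char) (h : ml ≤ t.length) : cellF ml (some t) = t := by
  simp only [cellF]
  split_ifs with ht
  · subst ht; simp at h; simp [pySpaces, h]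
  · rfl

-- assembled grid equality: A's chunks + zip_longest rendering equals B's index-arithmetic rendering
theorem grid_eq (temp : List (List Char)) (ml : Nat) (cols : Int)
    (hml : ∀ t ∈ temp, ml ≤ t.length) (hcols : 0 < cols) (hne : temp ≠ []) :
    String.ofList (PySem.Chars.join ['\n']
      ((zipLongest (splitsGo temp (pyCeilDiv (temp.length : Int) cols) (temp.length + 1) 0)).foldl
        (fun (acc : List (List Char)) parts =>
          let line := parts.foldl (fun (ln : List (List Char)) part =>
            match part with
            | none => ln ++ [pySpaces ml]
            | some p => if p = [] then ln ++ [pySpaces ml] else ln ++ [p]) []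
          acc ++ [PySem.Chars.join [' '] line]) []))
    = (if pyCeilDiv (temp.length : Int) cols ≤ 0 then "" else
        String.ofList (PySem.Chars.join ['\n']
          ((PySem.List.pyRange 0 (pyCeilDiv (temp.length : Int) cols) 1).map (fun i =>
            PySem.Chars.join [' ']
              ((PySem.List.pyRange 0 (pyCeilDiv (temp.length : Int) (pyCeilDiv (temp.length : Int) cols)) 1).map (fun c =>
                if c * pyCeilDiv (temp.length : Int) cols + i < (temp.length : Int) then
                  PySem.List.pyGetD temp (c * pyCeilDiv (temp.length : Int) cols + i) (pySpaces ml)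
                else pySpaces ml)))))) := by
  have hN0 : 0 < temp.length := List.length_pos_of_ne_nil hne
  -- seg facts
  have hgspec : ((pyCeilDiv (temp.length : Int) cols - 1) * cols < (temp.length : Int) ∧
      (temp.length : Int) ≤ pyCeilDiv (temp.length : Int) cols * cols) :=
    (PySem.Int.neg_floordiv_neg_eq_iff_of_pos hcols).mp rfl
  set g := pyCeilDiv (temp.length : Int) cols with hgdef
  have hNl : (1 : Int) ≤ (temp.length : Int) := by exact_mod_cast hN0
  have hg : 0 < g := by nlinarith [hgspec.2]
  have hgN : g ≤ (temp.length : Int) := by nlinarith [hgspec.1]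
  have hgs : g = (g.toNat : Int) := by omega
  have hs1 : 1 ≤ g.toNat := by omega
  have hsN : g.toNat ≤ temp.length := by omega
  -- ncols facts
  have hKspec : ((pyCeilDiv (temp.length : Int) g - 1) * g < (temp.length : Int) ∧
      (temp.length : Int) ≤ pyCeilDiv (temp.length : Int) g * g) :=
    (PySem.Int.neg_floordiv_neg_eq_iff_of_pos hg).mp rfl
  set K := pyCeilDiv (temp.length : Int) g with hKdef
  have hK0 : 0 < K := by nlinarith [hKspec.2]
  have hKcast : K = (K.toNat : Int) := by omega
  set KN := K.toNat with hKN
  have hKN1 : 1 ≤ KN := by omega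
  have hKNa : (KN - 1) * g.toNat < temp.length := by
    have h1 : ((KN - 1 : Nat) : Int) = K - 1 := by omega
    have := hKspec.1
    rw [← h1, hgs] at this
    exact_mod_cast this
  have hKNb : temp.length ≤ KN * g.toNat := by
    have := hKspec.2
    rw [hKcast, hgs] at this
    exact_mod_cast this
  rw [if_neg (by omega : ¬ g ≤ 0)]
  -- the chunk list
  have hfuel : temp.length ≤ 0 + (temp.length + 1) * g.toNat := by
    have h1 : (temp.length + 1) * g.toNat = temp.length * g.toNat + g.toNat := by
      rw [Nat.add_mul, Nat.one_mul]
    have h2 : temp.length ≤ temp.length * g.toNat := Nat.le_mul_of_pos_right _ (by omega)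
    omega
  have hlen0 : (splitsGo temp g (temp.length + 1) ((0 : Nat) : Int)).length
      = (temp.length - 0 + g.toNat - 1) / g.toNat := splitsGo_len temp g hg _ 0 hfuel
  have hget0 : ∀ c, (splitsGo temp g (temp.length + 1) ((0 : Nat) : Int))[c]? =
      if 0 + c * g.toNat < temp.length then some ((temp.drop (0 + c * g.toNat)).take g.toNat) else none :=
    splitsGo_get temp g hg _ 0 hfuel
  have hzero : ((0 : Nat) : Int) = (0 : Int) := by norm_num
  rw [hzero] at hlen0 hget0
  set splits := splitsGo temp g (temp.length + 1) 0 with hsplits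
  have hcnt : splits.length = KN := by
    rw [hlen0]
    obtain ⟨k', hk'⟩ : ∃ k', KN = k' + 1 := ⟨KN - 1, by omega⟩
    have e1 : (k' + 1) * g.toNat = k' * g.toNat + g.toNat := by rw [Nat.add_mul, Nat.one_mul]
    have e2 : (k' + 1 + 1) * g.toNat = k' * g.toNat + g.toNat + g.toNat := by ring
    rw [hk']
    apply Nat.div_eq_of_lt_le
    · rw [e1]
      rw [hk'] at hKNa
      simp only [Nat.add_sub_cancel] at hKNa
      omega
    · rw [e2]
      rw [hk', e1] at hKNb
      omega
  -- c*s < N ↔ c < KN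
  have hiff : ∀ c : Nat, (c * g.toNat < temp.length ↔ c < KN) := by
    intro c
    constructor
    · intro h
      by_contra hc
      push_neg at hc
      have : KN * g.toNat ≤ c * g.toNat := Nat.mul_le_mul_right _ hc
      omega
    · intro h
      have : c * g.toNat ≤ (KN - 1) * g.toNat := Nat.mul_le_mul_right _ (by omega)
      omega
  -- chunk lengths
  have hchunk_le : ∀ ch ∈ splits, ch.length ≤ g.toNat := by
    intro ch hch
    obtain ⟨c, hc⟩ := List.mem_iff_getElem?.mp hch
    rw [hget0 c] at hc
    by_cases h : 0 + c * g.toNat < temp.length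
    · rw [if_pos h] at hc
      cases hc
      simp [List.length_take]
    · rw [if_neg h] at hc
      cases hc
  have hchunk0 : splits[0]? = some (temp.take g.toNat) := by
    rw [hget0 0]
    simp [hN0]
  have hchunk0_mem : temp.take g.toNat ∈ splits := List.mem_of_getElem? hchunk0
  have hm : splits.foldl (fun a ch => max a ch.length) 0 = g.toNat := by
    have hrw : splits.foldl (fun a ch => max a ch.length) 0 = (splits.map List.length).foldl max 0 :=
      by rw [List.foldl_map]
    rw [hrw]
    apply le_antisymm
    · apply foldl_max_le
      · omega
      · intro x hx
        obtain ⟨ch, hch, hlx⟩ := List.mem_map.mp hx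
        exact hlx ▸ hchunk_le ch hch
    · have hmem : g.toNat ∈ splits.map List.length := by
        apply List.mem_map.mpr
        exact ⟨temp.take g.toNat, hchunk0_mem, by simp [List.length_take]; omega⟩
      exact mem_le_foldl_max _ 0 _ hmem
  -- zip_longest as a map over range g.toNat
  have hzip : zipLongest splits = (List.range g.toNat).map (fun i => splits.map (fun ch => ch[i]?)) := by
    simp only [zipLongest, hm]
  -- the per-cell fold to map
  have hcell : ∀ parts : List (Option (List Char)),
      parts.foldl (fun (ln : List (List Char)) part =>
        match part with
        | none => ln ++ [pySpaces ml]
        | some p => if p = [] then ln ++ [pySpaces ml] else ln ++ [p]) []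
      = parts.map (cellF ml) := by
    intro parts
    have h : (fun (ln : List (List Char)) (part : Option (List Char)) =>
        match part with
        | none => ln ++ [pySpaces ml]
        | some p => if p = [] then ln ++ [pySpaces ml] else ln ++ [p])
        = fun ln part => ln ++ [cellF ml part] := by
      funext ln part
      cases part with
      | none => rfl
      | some p =>
        by_cases hp : p = [] <;> simp [cellF, hp]
    rw [h, foldl_app]
    simp
  -- the outer fold to map
  have houter : ∀ rows : List (List (Option (List Char))),
      rows.foldl (fun (acc : List (List Char)) parts =>
        let line := parts.foldl (fun (ln : List (List Char)) part =>
          match part with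
          | none => ln ++ [pySpaces ml]
          | some p => if p = [] then ln ++ [pySpaces ml] else ln ++ [p]) []
        acc ++ [PySem.Chars.join [' '] line]) []
      = rows.map (fun parts => PySem.Chars.join [' '] (parts.map (cellF ml))) := by
    intro rows
    have h : (fun (acc : List (List Char)) (parts : List (Option (List Char))) =>
        let line := parts.foldl (fun (ln : List (List Char)) part =>
          match part with
          | none => ln ++ [pySpaces ml]
          | some p => if p = [] then ln ++ [pySpaces ml] else ln ++ [p]) []
        acc ++ [PySem.Chars.join [' '] line])
        = fun acc parts => acc ++ [PySem.Chars.join [' '] (parts.map (cellF ml))] := by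
      funext acc parts
      simp only [hcell]
    rw [h, foldl_app]
    simp
  rw [houter, hzip]
  -- B side ranges to List.range
  rw [pyRange_int g hg.le, pyRange_int K hK0.le]
  congr 1
  apply congrArg
  rw [List.map_map, List.map_map]
  apply List.map_congr_left
  intro i hi
  have hilt : i < g.toNat := List.mem_range.mp hi
  simp only [Function.comp]
  apply congrArg
  rw [List.map_map]
  apply List.ext_getElem?
  intro c
  rw [List.getElem?_map, List.getElem?_map, hget0 c, List.getElem?_map]
  by_cases hc : c < KN
  · rw [List.getElem?_range hc]
    rw [if_pos (by have := (hiff c).mpr hc; omega)]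
    simp only [Option.map_some, Function.comp_apply]
    congr 1
    have hcast : (c : Int) * g + (i : Int) = ((c * g.toNat + i : Nat) : Int) := by
      push_cast; rw [← hgs]
    rw [List.getElem?_take, if_pos hilt, List.getElem?_drop]
    by_cases hin : c * g.toNat + i < temp.length
    · rw [List.getElem?_eq_getElem (by omega)]
      rw [cellF_of_mem ml _ (hml _ (List.getElem_mem _))]
      rw [if_pos (by rw [hcast]; exact_mod_cast hin)]
      simp only [PySem.List.pyGetD, hcast, PySem.List.pyGet?_natCast]
      rw [List.getElem?_eq_getElem (by omega)]
      simp
    · rw [List.getElem?_eq_none (by omega)]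
      rw [if_neg (by rw [hcast]; exact_mod_cast hin)]
      rfl
  · rw [List.getElem?_eq_none (by simp; omega)]
    rw [if_neg (by have := (hiff c).mp; intro h; exact hc (this (by omega)))]
    rfl


theorem arrange_empty (cols : Int) (b : Bool) :
    arrange [] cols b = arrange_alt [] cols b := by
  simp [arrange, arrange_alt, splitsGo, zipLongest, pyCeilDiv, PySem.Int.floordiv,
    Int.zero_fdiv, PySem.Chars.join, List.intercalate]

-- ===== VERDICT (by name: the statement is the Claim_ definition above) =====
theorem arrange_spec : Claim_equal_arrange := by
  intro values cols b _dom pre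
  unfold Spec_arrange
  by_cases hv : values = []
  · subst hv
    exact arrange_empty cols b
  · have hcols : 0 < cols := by
      rcases pre with h | h
      · exact h
      · exact absurd h.1 hv
    -- reduce both sides to the shared temp and apply grid_eq
    have hml : ∀ t ∈ (PySem.List.enumerate (values.map String.toList)).map
        (entryF b (values.foldl (fun m v => max v.toList.length m) 0)),
        values.foldl (fun m v => max v.toList.length m) 0 ≤ t.length := by
      intro t ht
      obtain ⟨p, _, rfl⟩ := List.mem_map.mp ht
      exact entry_len _ _ p
    have htne : (PySem.List.enumerate (values.map String.toList)).map
        (entryF b (values.foldl (fun m v => max v.toList.length m) 0)) ≠ [] := by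
      intro h
      apply hv
      have := congrArg List.length h
      simpa [PySem.List.length_enumerate] using this
    simp only [arrange, arrange_alt]
    rw [fold1 values 0 []]
    simp only [List.nil_append]
    rw [tempA_eq, tempB_eq]
    exact grid_eq _ _ cols hml hcols htne
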